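-- pv_equiv track=rewrite | github.com/digitalgoldfisj79/Voynich | scripts/p75_check_single_edit.py | ed1
-- ===== SOURCE A (Python) =====
-- def ed1(a, b):
--     """True Levenshtein distance == 1 (no libs, explicit)."""
--     if a == b:
--         return False
--     la, lb = len(a), len(b)
--     if abs(la - lb) > 1:
--         return False
--
--     # Same length: check exactly one substitution
--     if la == lb:
--         diff = sum(1 for x, y in zip(a, b) if x != y)
--         return diff == 1
--
--     # Length differs by 1: check single insertion/deletion
--     # Ensure a is shorter
--     if la > lb:
--         a, b = b, a
--         la, lb = lb, la
--
--     i = j = diff = 0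
--     while i < la and j < lb:
--         if a[i] == b[j]:
--             i += 1
--             j += 1
--         else:
--             diff += 1
--             if diff > 1:
--                 return False
--             j += 1  # skip one char in longer string
--     # Account for trailing char
--     diff += (lb - j)
--     return diff == 1
-- ===== SOURCE B (Python) =====
-- def ed1(a, b):
--     """True Levenshtein distance == 1: strip the common prefix, then one edit must fix the rest."""
--     n = min(len(a), len(b))
--     i = 0
--     while i < n and a[i] == b[i]:
--         i += 1
--     ra, rb = a[i:], b[i:]
--     if not ra and not rb:
--         return False
--     return ra[1:] == rb[1:] or ra == rb[1:] or ra[1:] == rb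
-- ===== Notes on version B (the rewrite author's own statement) =====
-- stated objective: simpler
-- what changed: Replaced A's equal-vs-unequal-length case split, mismatch counter and two-pointer skip loop by a single common-prefix strip followed by three tail-equality comparisons (substitute/insert/delete).
import Mathlib
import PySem

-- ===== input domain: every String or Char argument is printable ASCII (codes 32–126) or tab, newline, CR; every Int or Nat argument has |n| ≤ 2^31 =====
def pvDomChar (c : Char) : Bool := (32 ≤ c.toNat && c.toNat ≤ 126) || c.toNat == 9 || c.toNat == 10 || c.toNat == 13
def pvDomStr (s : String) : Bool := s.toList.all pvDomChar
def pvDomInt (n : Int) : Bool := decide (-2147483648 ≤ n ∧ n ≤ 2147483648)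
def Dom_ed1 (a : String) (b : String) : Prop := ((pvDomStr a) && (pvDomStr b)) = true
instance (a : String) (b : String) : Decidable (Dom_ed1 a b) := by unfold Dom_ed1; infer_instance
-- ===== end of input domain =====

-- B replaces A's equal-vs-unequal-length case split and counters by one common-prefix strip
-- followed by three tail comparisons (objective: simpler).

-- ===== PORT A =====
-- diff = sum(1 for x, y in zip(a, b) if x != y)
def ed1CountDiff (a b : List Char) : Int :=
  ((a.zip b).filter (fun p => p.1 ≠ p.2)).length

-- the while loop: xs = a[i:], ys = b[j:] (a the shorter list), then diff += (lb - j); return diff == 1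
def ed1Loop : List Char → List Char → Int → Bool
  | x :: xs, y :: ys, diff =>
      if x = y then ed1Loop xs ys diff
      else if diff + 1 > 1 then false else ed1Loop (x :: xs) ys (diff + 1)
  | _, ys, diff => decide (diff + (ys.length : Int) = 1)
termination_by xs ys _ => ys.length
decreasing_by all_goals simp

def ed1Core (a b : List Char) : Bool :=
  if a = b then false
  else if ((a.length : Int) - (b.length : Int)).natAbs > 1 then false
  else if a.length = b.length then decide (ed1CountDiff a b = 1)
  else if a.length > b.length then ed1Loop b a 0
  else ed1Loop a b 0

def ed1 (a : String) (b : String) : Bool := ed1Core a.toList b.toList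

-- ===== PORT B =====
-- strip common prefix; then distance 1 iff one edit (substitute / insert / delete) equalises the tails
def ed1AltCore : List Char → List Char → Bool
  | x :: xs, y :: ys =>
      if x = y then ed1AltCore xs ys
      else ((x :: xs).drop 1 = (y :: ys).drop 1 || (x :: xs) = (y :: ys).drop 1
            || (x :: xs).drop 1 = (y :: ys))
  | [], [] => false
  | a, b => (a.drop 1 = b.drop 1 || a = b.drop 1 || a.drop 1 = b)

def ed1_alt (a : String) (b : String) : Bool := ed1AltCore a.toList b.toList

-- ===== PRECONDITION & SPEC =====
def Spec_ed1 (a : String) (b : String) (out : Bool) : Prop := out = ed1_alt a b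
instance (a : String) (b : String) (out : Bool) : Decidable (Spec_ed1 a b out) := by unfold Spec_ed1; infer_instance

-- ===== CLAIM (what is proved, stated in full; the proofs are below) =====
def Claim_equal_ed1 : Prop := ∀ (a : String) (b : String), Dom_ed1 a b → Spec_ed1 a b (ed1 a b)

-- ===== LEMMAS AND PROOFS =====

-- with diff = 1 already, the remaining scan of equal-length lists succeeds iff they are equal
theorem ed1Loop_one (s l : List Char) (h : s.length = l.length) :
    ed1Loop s l 1 = decide (s = l) := by
  induction s generalizing l with
  | nil => cases l with
    | nil => simp [ed1Loop]
    | cons y ys => simp at h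
  | cons x xs ih =>
    cases l with
    | nil => simp at h
    | cons y ys =>
      simp at h
      by_cases hxy : x = y
      · subst hxy; simp [ed1Loop, ih ys h]
      · simp [ed1Loop, hxy]

theorem ed1CountDiff_zero (a b : List Char) (h : a.length = b.length) :
    ed1CountDiff a b = 0 ↔ a = b := by
  induction a generalizing b with
  | nil => cases b with
    | nil => simp [ed1CountDiff]
    | cons y ys => simp at h
  | cons x xs ih =>
    cases b with
    | nil => simp at h
    | cons y ys =>
      simp at h
      by_cases hxy : x = y
      · subst hxy
        simp only [ed1CountDiff, List.zip_cons_cons, List.filter] at *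
        simpa [ed1CountDiff] using ih ys h
      · constructor
        · intro hc
          exfalso
          simp only [ed1CountDiff, List.zip_cons_cons, List.filter, hxy] at hc
          simp [hxy] at hc
          omega
        · intro he; simp at he; exact absurd he.1 hxy

theorem ed1CountDiff_cons (x y : Char) (xs ys : List Char) :
    ed1CountDiff (x :: xs) (y :: ys)
      = (if x = y then 0 else 1) + ed1CountDiff xs ys := by
  by_cases hxy : x = y <;> simp [ed1CountDiff, List.filter, hxy] <;> omega

theorem ed1CountDiff_nonneg (a b : List Char) : 0 ≤ ed1CountDiff a b := by
  simp [ed1CountDiff]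

-- main equivalence on lists
theorem ed1Core_eq_alt (a b : List Char) : ed1Core a b = ed1AltCore a b := by
  induction a generalizing b with
  | nil =>
    cases b with
    | nil => simp [ed1Core, ed1AltCore]
    | cons y ys =>
      cases ys with
      | nil => simp [ed1Core, ed1AltCore, ed1Loop]
      | cons z zs =>
        have hlen : (((0 : Int) - ((z :: zs).length + 1 : Int)).natAbs > 1) := by
          simp; omega
        simp only [ed1Core, ed1AltCore]
        simp [List.length_cons]
        omega
  | cons x xs ih =>
    cases b with
    | nil =>
      cases xs with
      | nil => simp [ed1Core, ed1AltCore, ed1Loop]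
      | cons z zs =>
        simp only [ed1Core, ed1AltCore]
        simp [List.length_cons]
        omega
    | cons y ys =>
      by_cases hxy : x = y
      · -- equal heads: both sides reduce to the tails
        subst hxy
        rw [ed1AltCore]
        simp only [if_pos rfl]
        rw [← ih ys]
        -- show ed1Core (x::xs) (x::ys) = ed1Core xs ys
        by_cases heq : xs = ys
        · subst heq; simp [ed1Core]
        · have hne : (x :: xs) ≠ (x :: ys) := by simp [heq]
          by_cases hlen : xs.length = ys.length
          · simp only [ed1Core, if_neg hne, if_neg heq]
            have h1 : (((x :: xs).length : Int) - ((x :: ys).length : Int)).natAbs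
                = ((xs.length : Int) - (ys.length : Int)).natAbs := by
              simp
            simp [hlen, h1, ed1CountDiff_cons]
          · by_cases hgap : ((xs.length : Int) - (ys.length : Int)).natAbs > 1
            · simp only [ed1Core, if_neg hne, if_neg heq]
              have h1 : (((x :: xs).length : Int) - ((x :: ys).length : Int)).natAbs > 1 := by
                simp at hgap ⊢; omega
              simp [h1, hgap]
            · -- length gap exactly 1
              simp only [ed1Core, if_neg hne, if_neg heq]
              have h1 : ¬ ((((x :: xs).length : Int) - ((x :: ys).length : Int)).natAbs > 1) := by
                simp at hgap ⊢; omega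
              have h2 : ¬ ((x :: xs).length = (x :: ys).length) := by simp [hlen]
              simp only [if_neg h1, h2, if_neg (by simp at hgap ⊢; omega : ¬ (((xs.length : Int) - (ys.length : Int)).natAbs > 1)), if_neg hlen]
              by_cases hgt : xs.length > ys.length
              · have : (x :: xs).length > (x :: ys).length := by simp; omega
                simp [this, hgt, ed1Loop]
              · have : ¬ ((x :: xs).length > (x :: ys).length) := by simp; omega
                simp [this, hgt, ed1Loop]
      · -- differing heads
        rw [ed1AltCore]
        simp only [if_neg hxy, List.drop_one, List.tail_cons]
        have hne : (x :: xs) ≠ (y :: ys) := by simp [hxy]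
        by_cases hlen : xs.length = ys.length
        · -- equal lengths: substitution case
          simp only [ed1Core, if_neg hne]
          have h1 : ¬ ((((x :: xs).length : Int) - ((y :: ys).length : Int)).natAbs > 1) := by
            simp; omega
          have h2 : (x :: xs).length = (y :: ys).length := by simp [hlen]
          simp only [if_neg h1, if_pos h2, decide_eq_true_eq] at *
          have hc := ed1CountDiff_cons x y xs ys
          rw [if_neg hxy] at hc
          have hz := ed1CountDiff_zero xs ys hlen
          have hnn := ed1CountDiff_nonneg xs ys
          have hA : (decide (ed1CountDiff (x :: xs) (y :: ys) = 1)) = decide (xs = ys) := by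
            by_cases hxys : xs = ys
            · rw [hc, hz.mpr hxys]; simp [hxys]
            · have hnz : ed1CountDiff xs ys ≠ 0 := fun h => hxys (hz.mp h)
              rw [hc]; simp [hxys]; omega
          rw [hA]
          have hb1 : (x :: xs) ≠ ys := by
            intro h; have := congrArg List.length h; simp [hlen] at this
          have hb2 : xs ≠ (y :: ys) := by
            intro h; have := congrArg List.length h; simp [hlen] at this
          by_cases hxys : xs = ys <;> simp [hxys, hb1, hb2]
        · by_cases hgap : ((xs.length : Int) - (ys.length : Int)).natAbs > 1
          · -- length gap ≥ 2: both false
            simp only [ed1Core, if_neg hne]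
            have h1 : ((((x :: xs).length : Int) - ((y :: ys).length : Int)).natAbs > 1) := by
              simp at hgap ⊢; omega
            simp only [if_pos h1]
            have hb0 : xs ≠ ys := fun h => hlen (congrArg List.length h)
            have hb1 : (x :: xs) ≠ ys := by
              intro h; have := congrArg List.length h; simp at this hgap; omega
            have hb2 : xs ≠ (y :: ys) := by
              intro h; have := congrArg List.length h; simp at this hgap; omega
            simp [hb0, hb1, hb2]
          · -- length gap exactly 1: insertion/deletion case
            simp only [ed1Core, if_neg hne]
            have h1 : ¬ ((((x :: xs).length : Int) - ((y :: ys).length : Int)).natAbs > 1) := by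
              simp at hgap ⊢; omega
            have h2 : ¬ ((x :: xs).length = (y :: ys).length) := by simp [hlen]
            simp only [if_neg h1, if_neg h2]
            have hb0 : xs ≠ ys := fun h => hlen (congrArg List.length h)
            by_cases hgt : xs.length > ys.length
            · -- a longer: swap, scan (y::ys) against (x::xs): mismatch, then ed1Loop (y::ys) xs 1
              have hg : (x :: xs).length > (y :: ys).length := by simp; omega
              have hgap2 : xs.length ≤ ys.length + 1 := by
                simp only [List.length_cons] at hgap ⊢
                omega
              have hlen2 : (y :: ys).length = xs.length := by
                simp only [List.length_cons]; omega
              have hb1 : (x :: xs) ≠ ys := fun h => by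
                have := congrArg List.length h; simp at this; omega
              have hyx : ¬ y = x := fun h => hxy h.symm
              simp only [if_pos hg, ed1Loop, if_neg hyx]
              norm_num
              rw [ed1Loop_one _ _ hlen2]
              by_cases hc : xs = y :: ys
              · have hc' : (y :: ys) = xs := hc.symm
                simp [hc', hb0, hb1]
              · have hc' : ¬ ((y :: ys) = xs) := fun h => hc h.symm
                simp [hc, hc', hb0, hb1]
            · -- b longer: scan (x::xs) against (y::ys): mismatch, then ed1Loop (x::xs) ys 1
              have hg : ¬ ((x :: xs).length > (y :: ys).length) := by simp; omega
              have hgap2 : ys.length ≤ xs.length + 1 := by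
                simp only [List.length_cons] at hgap ⊢
                omega
              have hlen2 : (x :: xs).length = ys.length := by
                simp only [List.length_cons]; omega
              have hb1 : (x :: xs) ≠ ys → ¬ ((x :: xs) = ys) := id
              simp only [if_neg hg, ed1Loop, if_neg hxy]
              norm_num
              rw [ed1Loop_one _ _ hlen2]
              have hb2 : xs ≠ (y :: ys) := fun h => by
                have := congrArg List.length h; simp at this; omega
              by_cases hc : (x :: xs) = ys <;> simp [hc, hb0, hb2]

-- ===== VERDICT (by name: the statement is the Claim_ definition above) =====
theorem ed1_spec : Claim_equal_ed1 := by
  intro a b _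
  unfold Spec_ed1 ed1 ed1_alt
  exact ed1Core_eq_alt a.toList b.toList
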